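-- pv_equiv track=rewrite | github.com/BeLikeWater/ReleaseHub360 | packages/mcp-server/src/llm_code_analyzer.py | _determine_overall_impact
-- ===== SOURCE A (Python) =====
-- from typing import List, Dict, Any, Optional
--
-- def _determine_overall_impact(analyses: List[Dict[str, Any]]) -> str:
--     """Determine overall impact from file analyses"""
--     impacts = [a.get("impact", "medium") for a in analyses]
--     # If any high impact, return high
--     if "high" in impacts:
--         return "high"
--     elif "medium" in impacts:
--         return "medium"
--     else:
--         return "low"
-- ===== SOURCE B (Python) =====
-- def _determine_overall_impact(analyses):
--     """Determine overall impact from file analyses"""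
--     rank = {"low": 0, "medium": 1, "high": 2}
--     score = max((rank.get(a.get("impact", "medium"), 0) for a in analyses), default=0)
--     return ("low", "medium", "high")[score]
-- ===== Notes on version B (the rewrite author's own statement) =====
-- stated objective: simpler
-- what changed: Replaces the build-a-list-of-impacts-plus-two-membership-scans with a single numeric max reduction over impact ranks, then maps the max rank back to a label.
import Mathlib
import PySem

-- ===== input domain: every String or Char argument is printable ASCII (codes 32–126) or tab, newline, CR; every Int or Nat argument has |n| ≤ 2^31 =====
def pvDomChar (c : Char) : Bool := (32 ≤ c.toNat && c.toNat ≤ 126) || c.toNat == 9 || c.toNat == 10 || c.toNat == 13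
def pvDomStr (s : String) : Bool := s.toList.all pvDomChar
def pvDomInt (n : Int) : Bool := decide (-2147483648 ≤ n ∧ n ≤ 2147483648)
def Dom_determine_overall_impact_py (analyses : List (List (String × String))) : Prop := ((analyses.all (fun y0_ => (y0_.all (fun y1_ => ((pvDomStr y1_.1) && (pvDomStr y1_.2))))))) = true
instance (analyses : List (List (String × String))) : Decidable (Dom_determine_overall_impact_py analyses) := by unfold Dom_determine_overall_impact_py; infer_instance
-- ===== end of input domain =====

-- B replaces the impact-list build plus two membership scans with one numeric max
-- reduction over impact ranks (objective: simpler).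


-- shared helper: a.get(k, d) on an association list (first match wins)
def pvAlGet (a : List (String × String)) (k d : String) : String :=
  ((a.find? (fun p => p.1 == k)).map Prod.snd).getD d

-- ===== PORT A =====
def determine_overall_impact_py (analyses : List (List (String × String))) : String :=
  let impacts := analyses.map (fun a => pvAlGet a "impact" "medium")
  if impacts.contains "high" then "high"
  else if impacts.contains "medium" then "medium"
  else "low"

-- ===== PORT B =====
-- rank.get(s, 0)
def pvRank (s : String) : Nat :=
  if s = "low" then 0 else if s = "medium" then 1 else if s = "high" then 2 else 0

def determine_overall_impact_py_alt (analyses : List (List (String × String))) : String :=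
  let score := (analyses.map (fun a => pvRank (pvAlGet a "impact" "medium"))).foldl max 0
  (["low", "medium", "high"].getD score "low")

-- ===== PRECONDITION & SPEC =====
def Spec_determine_overall_impact_py (analyses : List (List (String × String))) (out : String) : Prop := out = determine_overall_impact_py_alt analyses
instance (analyses : List (List (String × String))) (out : String) : Decidable (Spec_determine_overall_impact_py analyses out) := by unfold Spec_determine_overall_impact_py; infer_instance

-- ===== CLAIM (what is proved, stated in full; the proofs are below) =====
def Claim_equal_determine_overall_impact_py : Prop := ∀ (analyses : List (List (String × String))), Dom_determine_overall_impact_py analyses → Spec_determine_overall_impact_py analyses (determine_overall_impact_py analyses)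

-- ===== LEMMAS AND PROOFS =====

theorem foldl_max_acc (l : List Nat) (a : Nat) :
    l.foldl max a = max a (l.foldl max 0) := by
  induction l generalizing a with
  | nil => simp
  | cons x xs ih =>
    simp only [List.foldl]
    rw [ih (max a x), ih (max 0 x)]
    omega

-- the max rank of a list of impact strings, characterised by membership
theorem foldl_max_rank (l : List String) :
    (l.map pvRank).foldl max 0 =
      if l.contains "high" then 2 else if l.contains "medium" then 1 else 0 := by
  induction l with
  | nil => simp
  | cons s rest ih =>
    simp only [List.map, List.foldl, List.contains_cons]
    rw [foldl_max_acc, ih]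
    by_cases hh : s = "high" <;> by_cases hm : s = "medium" <;>
      simp [pvRank, hh, hm] <;> split_ifs <;> simp_all

theorem determine_overall_impact_py_eq (analyses : List (List (String × String))) :
    determine_overall_impact_py analyses = determine_overall_impact_py_alt analyses := by
  unfold determine_overall_impact_py determine_overall_impact_py_alt
  rw [show (fun a => pvRank (pvAlGet a "impact" "medium"))
        = pvRank ∘ (fun a => pvAlGet a "impact" "medium") from rfl,
     ← List.map_map, foldl_max_rank]
  split_ifs <;> simp_all <;> split_ifs <;> simp_all <;> tauto

-- ===== VERDICT (by name: the statement is the Claim_ definition above) =====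
theorem determine_overall_impact_py_spec : Claim_equal_determine_overall_impact_py := by
  intro analyses _
  unfold Spec_determine_overall_impact_py
  exact determine_overall_impact_py_eq analyses
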